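-- pv_equiv track=rewrite | github.com/Miroka96/mmdenovo | mmproteo/mmproteo/utils/utils.py | extract_dict_or_inner_element
-- ===== SOURCE A (Python) =====
-- from typing import Any, Hashable, Iterable, List, Optional, Union
--
-- def extract_dict_or_inner_element(elem: Union[Iterable, Any]) -> Union[Iterable, Any]:
--     try:
--         # skip one-element lists or sets,...
--         while type(elem) == list or type(elem) == set or type(elem) == tuple:
--             if len(elem) == 1:
--                 elem = next(iter(elem))
--                 continue
--             non_null_elements = [e for e in elem if e is not None]
--             if len(non_null_elements) == 0:
--                 elem = None
--                 break
--             if len(non_null_elements) == 1: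
--                 elem = non_null_elements[0]
--                 continue
--             break
--     except Exception:
--         pass
--     return elem
-- ===== SOURCE B (Python) =====
-- def extract_dict_or_inner_element(elem):
--     # recursive unwrapping, one nesting level per call; single early-exit scan
--     # instead of building the filtered list
--     if type(elem) != list and type(elem) != set and type(elem) != tuple:
--         return elem
--     if len(elem) == 1:
--         return extract_dict_or_inner_element(next(iter(elem)))
--     count = 0
--     first = None
--     for e in elem:
--         if e is not None:
--             count += 1
--             if count == 1:
--                 first = e
--             else:
--                 break
--     if count == 0:
--         return None
--     if count == 1:
--         return extract_dict_or_inner_element(first)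
--     return elem
-- ===== Notes on version B (the rewrite author's own statement) =====
-- stated objective: alternative
-- what changed: Replaces the flat while-descent that materialises the filtered non-null list with a recursive one-level-per-call unwrap using a single early-exit scan that only tracks the first non-null element and a count capped at two.
-- outside the precondition, e.g. on extract_dict_or_inner_element([1, 2]): A returns [1, 2], B returns [1, 2]
import Mathlib
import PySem

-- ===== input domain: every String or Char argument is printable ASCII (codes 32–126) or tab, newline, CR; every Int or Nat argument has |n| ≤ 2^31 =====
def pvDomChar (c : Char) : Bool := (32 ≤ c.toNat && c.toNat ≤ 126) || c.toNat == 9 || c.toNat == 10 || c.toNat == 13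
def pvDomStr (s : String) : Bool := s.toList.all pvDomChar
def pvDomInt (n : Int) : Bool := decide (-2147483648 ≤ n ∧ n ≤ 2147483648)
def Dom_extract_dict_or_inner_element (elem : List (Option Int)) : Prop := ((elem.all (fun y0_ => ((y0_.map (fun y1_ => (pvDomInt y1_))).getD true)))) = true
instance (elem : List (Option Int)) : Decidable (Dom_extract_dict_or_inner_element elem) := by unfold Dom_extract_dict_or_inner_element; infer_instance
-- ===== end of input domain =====

-- B unwraps recursively with a single early-exit scan (first non-null + capped count) instead of A's while-loop that builds the filtered list; equivalence on inputs whose result is a single Optional[int].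


-- ===== PORT A =====
-- For a flat list of Optional[int], A's while loop performs at most one effective
-- iteration: after any reassignment elem is no longer a list and the loop exits.
def extract_dict_or_inner_element (elem : List (Option Int)) : Option Int :=
  if elem.length = 1 then elem.headD none       -- elem = next(iter(elem))
  else
    let non_null_elements := elem.filter (fun e => e.isSome)
    if non_null_elements.length = 0 then none
    else if non_null_elements.length = 1 then non_null_elements.headD none
    else none  -- Python returns the list itself here (not an Optional[int]); excluded by Pre_

-- ===== PORT B =====
-- early-exit scan: first non-null element and a count capped at two
def pvScanFirstTwo : List (Option Int) → Nat × Option Int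
  | [] => (0, none)
  | none :: rest => pvScanFirstTwo rest
  | some x :: rest => if rest.any (fun e => e.isSome) then (2, some x) else (1, some x)

def extract_dict_or_inner_element_alt (elem : List (Option Int)) : Option Int :=
  match elem with
  | [x] => x                                    -- recursive call on x : Option Int returns x
  | _ =>
    match pvScanFirstTwo elem with
    | (0, _) => none
    | (1, first) => first                       -- recursive call on first returns first
    | _ => none  -- Python returns the list itself here; excluded by Pre_

-- ===== PRECONDITION & SPEC =====
-- Pre_ excludes lists (of length ≠ 1) holding two or more non-null elements: there the
-- Python function returns the list itself, which is not a value of the declared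
-- Option Int result type.
def Pre_extract_dict_or_inner_element (elem : List (Option Int)) : Prop :=
  elem.length = 1 ∨ elem.countP (fun e => e.isSome) ≤ 1
instance (elem : List (Option Int)) : Decidable (Pre_extract_dict_or_inner_element elem) := by unfold Pre_extract_dict_or_inner_element; infer_instance

def pvWitness_extract_dict_or_inner_element : List (Option Int) := [some 5, none, none]

def Spec_extract_dict_or_inner_element (elem : List (Option Int)) (out : Option Int) : Prop := out = extract_dict_or_inner_element_alt elem
instance (elem : List (Option Int)) (out : Option Int) : Decidable (Spec_extract_dict_or_inner_element elem out) := by unfold Spec_extract_dict_or_inner_element; infer_instance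

-- ===== CLAIM (what is proved, stated in full; the proofs are below) =====
def Claim_equal_extract_dict_or_inner_element : Prop := ∀ (elem : List (Option Int)), Dom_extract_dict_or_inner_element elem → Pre_extract_dict_or_inner_element elem → Spec_extract_dict_or_inner_element elem (extract_dict_or_inner_element elem)

-- ===== LEMMAS AND PROOFS =====

-- the early-exit scan is characterised by the filtered list's shape
theorem pvScanFirstTwo_eq (l : List (Option Int)) :
    pvScanFirstTwo l =
      match l.filter (fun e => e.isSome) with
      | [] => (0, none)
      | [a] => (1, a)
      | a :: _ :: _ => (2, a) := by
  induction l with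
  | nil => rfl
  | cons x rest ih =>
    cases x with
    | none => simpa [pvScanFirstTwo] using ih
    | some v =>
      simp only [pvScanFirstTwo, List.filter_cons, Option.isSome_some]
      by_cases h : rest.any (fun e => e.isSome)
      · have : rest.filter (fun e => e.isSome) ≠ [] := by
          rcases List.any_eq_true.mp h with ⟨a, ha, hpa⟩
          exact List.ne_nil_of_mem (List.mem_filter.mpr ⟨ha, hpa⟩)
        rcases hf : rest.filter (fun e => e.isSome) with _ | ⟨b, tl⟩
        · exact absurd hf this
        · simp [h, hf]
      · have hf : rest.filter (fun e => e.isSome) = [] := by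
          rw [List.filter_eq_nil_iff]
          intro a ha
          by_contra hc
          exact h (List.any_eq_true.mpr ⟨a, ha, by simpa using hc⟩)
        simp [h, hf]

-- ===== VERDICT (by name: the statement is the Claim_ definition above) =====
theorem extract_dict_or_inner_element_spec : Claim_equal_extract_dict_or_inner_element := by
  intro elem _ hpre
  unfold Spec_extract_dict_or_inner_element
  match elem with
  | [] => decide
  | [x] => cases x <;> rfl
  | x :: y :: rest =>
    have hcnt : (x :: y :: rest).countP (fun e => e.isSome) ≤ 1 := by
      rcases hpre with h1 | h2
      · simp at h1
      · exact h2
    have hlen : ((x :: y :: rest).filter (fun e => e.isSome)).length ≤ 1 := by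
      rw [← List.countP_eq_length_filter]; exact hcnt
    unfold extract_dict_or_inner_element extract_dict_or_inner_element_alt
    rw [pvScanFirstTwo_eq]
    rcases hf : (x :: y :: rest).filter (fun e => e.isSome) with _ | ⟨a, _ | ⟨b, tl⟩⟩
    · simp [hf]
    · simp [hf]
    · rw [hf] at hlen; simp at hlen
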